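-- pv_equiv track=rewrite | github.com/lesliewu0506/Helix-Hunters | baseline.py | two_strings_fold
-- ===== SOURCE A (Python) =====
-- def two_strings_fold(protein_sequence):
--     sequence_list = []
--     protein_length = len(protein_sequence)
--     for i in range(protein_length):
--         if i < (protein_length // 2 - 1):
--             sequence_list.append(1)
--         elif i == (protein_length // 2 - 1):
--             sequence_list.append(2)
--         elif i == (protein_length - 1):
--             sequence_list.append(0)
--         else:
--             sequence_list.append(-1)
--     return sequence_list
-- ===== SOURCE B (Python) =====
-- def two_strings_fold(protein_sequence):
--     n = len(protein_sequence)
--     if n == 0: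
--         return []
--     if n == 1:
--         return [0]
--     h = n // 2 - 1
--     return [1] * h + [2] + [-1] * (n - 2 - h) + [0]
-- ===== Notes on version B (the rewrite author's own statement) =====
-- stated objective: simpler
-- what changed: Replaces the per-index loop with four branches by a closed-form concatenation of constant segments ([1]*h + [2] + [-1]*(n-2-h) + [0]) computed from the length alone.
import Mathlib
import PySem

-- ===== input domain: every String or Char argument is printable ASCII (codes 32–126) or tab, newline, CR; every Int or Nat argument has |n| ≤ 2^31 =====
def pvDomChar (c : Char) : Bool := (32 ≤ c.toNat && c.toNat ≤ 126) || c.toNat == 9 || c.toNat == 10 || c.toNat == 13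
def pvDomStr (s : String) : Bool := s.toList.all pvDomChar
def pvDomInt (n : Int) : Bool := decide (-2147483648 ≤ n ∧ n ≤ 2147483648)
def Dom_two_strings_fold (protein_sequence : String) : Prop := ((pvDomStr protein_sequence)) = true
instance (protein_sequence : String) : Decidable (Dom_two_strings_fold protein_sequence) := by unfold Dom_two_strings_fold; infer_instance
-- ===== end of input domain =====

-- B replaces A's per-index loop with four branches by a closed-form concatenation of
-- constant segments computed from the length alone (objective: simpler).

-- ===== PORT A =====
def two_strings_fold (protein_sequence : String) : List Int :=
  let protein_length : Int := PySem.Str.len protein_sequence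
  (PySem.List.pyRange 0 protein_length 1).foldl (fun sequence_list i =>
    if i < PySem.Int.floordiv protein_length 2 - 1 then sequence_list ++ [(1:Int)]
    else if i = PySem.Int.floordiv protein_length 2 - 1 then sequence_list ++ [2]
    else if i = protein_length - 1 then sequence_list ++ [0]
    else sequence_list ++ [(-1)]) []

-- ===== PORT B =====
def two_strings_fold_alt (protein_sequence : String) : List Int :=
  let n := protein_sequence.toList.length
  if n = 0 then []
  else if n = 1 then [0]
  else
    let h := n / 2 - 1
    List.replicate h (1:Int) ++ [2] ++ List.replicate (n - 2 - h) (-1) ++ [0]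

-- ===== PRECONDITION & SPEC =====
def Spec_two_strings_fold (protein_sequence : String) (out : List Int) : Prop := out = two_strings_fold_alt protein_sequence
instance (protein_sequence : String) (out : List Int) : Decidable (Spec_two_strings_fold protein_sequence out) := by unfold Spec_two_strings_fold; infer_instance

-- ===== CLAIM (what is proved, stated in full; the proofs are below) =====
def Claim_equal_two_strings_fold : Prop := ∀ (protein_sequence : String), Dom_two_strings_fold protein_sequence → Spec_two_strings_fold protein_sequence (two_strings_fold protein_sequence)

-- ===== LEMMAS AND PROOFS =====

-- The segment picture of A's per-index dispatch, for lengths ≥ 2.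
theorem tsf_segments (m : Nat) (h2 : m ≥ 2) :
    (List.range m).map (fun k : Nat => (if (k:Int) < ((m/2:Nat):Int) - 1 then (1:Int)
          else if (k:Int) = ((m/2:Nat):Int) - 1 then 2
          else if (k:Int) = (m:Int) - 1 then 0 else -1))
    = List.replicate (m/2-1) (1:Int) ++ List.replicate 1 2
        ++ List.replicate (m - 2 - (m/2-1)) (-1) ++ List.replicate 1 0 := by
  apply List.ext_getElem
  · simp; omega
  · intro k hk1 hk2
    have hk : k < m := by simpa using hk1
    rw [List.getElem_map, List.getElem_range]
    simp only [List.getElem_append, List.length_replicate, List.length_append,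
      List.getElem_replicate]
    split_ifs <;> omega

-- A's fold, expressed over the length only, equals B's segment build.
theorem tsf_key (m : Nat) :
    (PySem.List.pyRange 0 (m:Int) 1).foldl (fun acc i =>
      if i < PySem.Int.floordiv (m:Int) 2 - 1 then acc ++ [(1:Int)]
      else if i = PySem.Int.floordiv (m:Int) 2 - 1 then acc ++ [2]
      else if i = (m:Int) - 1 then acc ++ [0]
      else acc ++ [(-1)]) []
    = (if m = 0 then [] else if m = 1 then [0] else
       List.replicate (m/2-1) (1:Int) ++ [2] ++ List.replicate (m - 2 - (m/2-1)) (-1) ++ [0]) := by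
  have hfun : (fun (acc : List Int) (i : Int) =>
      if i < PySem.Int.floordiv (m:Int) 2 - 1 then acc ++ [(1:Int)]
      else if i = PySem.Int.floordiv (m:Int) 2 - 1 then acc ++ [2]
      else if i = (m:Int) - 1 then acc ++ [0]
      else acc ++ [(-1)])
      = (fun acc i => acc ++ [if i < PySem.Int.floordiv (m:Int) 2 - 1 then (1:Int)
          else if i = PySem.Int.floordiv (m:Int) 2 - 1 then 2
          else if i = (m:Int) - 1 then 0 else -1]) := by
    funext acc i; split_ifs <;> rfl
  rw [hfun, PySem.List.foldl_append_singleton_eq_map, PySem.List.pyRange_zero_natCast,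
      List.map_map, List.nil_append]
  have hd : PySem.Int.floordiv (m:Int) 2 = ((m/2 : Nat) : Int) := by
    exact_mod_cast PySem.Int.floordiv_natCast m 2
  rcases Nat.lt_or_ge m 2 with h1 | h2
  · interval_cases m <;> decide
  · have hm0 : ¬ (m = 0) := by omega
    have hm1 : ¬ (m = 1) := by omega
    simp only [hm0, hm1, if_false, hd, Function.comp_def]
    have := tsf_segments m h2
    simpa using this

-- ===== VERDICT (by name: the statement is the Claim_ definition above) =====
theorem two_strings_fold_spec : Claim_equal_two_strings_fold := by
  intro s _
  show two_strings_fold s = two_strings_fold_alt s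
  simp only [two_strings_fold, two_strings_fold_alt, PySem.Str.len_eq]
  exact tsf_key s.toList.length
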